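-- pv_equiv track=rewrite | github.com/Dagobert42/ThesisHackathon | helpers.py | tag_exemplar
-- ===== SOURCE A (Python) =====
-- def tag_exemplar(sentence, labels):
--     sample = ""
--     last_label = "null"
--     for word, label in zip(sentence, labels):
--         if label != last_label and last_label != "null":
--                 sample += f"</{last_label}> "
--         if label != last_label and label != "null":
--                 sample += f"<{label}> "
--         sample += word + " "
--         last_label = label
--
--     return sample.strip(" . ") + '.'
-- ===== SOURCE B (Python) =====
-- from itertools import groupby
--
-- def tag_exemplar(sentence, labels):
--     parts = []
--     prev = None
--     for lab, grp in groupby(zip(sentence, labels), key=lambda p: p[1]):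
--         if prev is not None and prev != "null":
--             parts.append(f"</{prev}> ")
--         if lab != "null":
--             parts.append(f"<{lab}> ")
--         for word, _ in grp:
--             parts.append(word + " ")
--         prev = lab
--     return "".join(parts).strip(" . ") + "."
-- ===== Notes on version B (the rewrite author's own statement) =====
-- stated objective: idiomatic
-- what changed: B replaces A's per-word state machine (last_label carried across every word, tags emitted word by word) with itertools.groupby over zip(sentence, labels): maximal runs of equal labels are formed first and each run emits its closing/opening tags once, words collected per run and joined at the end.
import Mathlib
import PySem

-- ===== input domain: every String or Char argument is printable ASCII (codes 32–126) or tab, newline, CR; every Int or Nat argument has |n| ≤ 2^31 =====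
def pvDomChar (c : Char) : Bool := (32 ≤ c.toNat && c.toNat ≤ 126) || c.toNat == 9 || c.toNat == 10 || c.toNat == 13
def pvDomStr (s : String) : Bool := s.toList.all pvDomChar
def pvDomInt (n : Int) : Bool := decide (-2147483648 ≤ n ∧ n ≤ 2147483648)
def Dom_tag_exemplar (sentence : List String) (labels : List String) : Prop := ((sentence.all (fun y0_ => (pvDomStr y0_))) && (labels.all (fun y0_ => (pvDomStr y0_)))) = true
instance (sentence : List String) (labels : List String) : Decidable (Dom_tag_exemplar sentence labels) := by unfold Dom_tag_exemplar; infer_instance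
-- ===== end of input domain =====

-- B re-groups the (word, label) pairs into maximal runs of equal labels (itertools.groupby style)
-- and emits each run's tags once, instead of A's per-word state machine; equal return value, no speed claim.

-- ===== PORT A =====
-- A's loop: state (sample, last_label), one step per (word, label) pair of zip(sentence, labels).
def tag_exemplar (sentence : List String) (labels : List String) : String :=
  PySem.Str.stripChars
    (((List.zip sentence labels).foldl
      (fun (st : String × String) wl =>
        let s1 := if wl.2 ≠ st.2 ∧ st.2 ≠ "null" then st.1 ++ "</" ++ st.2 ++ "> " else st.1
        let s2 := if wl.2 ≠ st.2 ∧ wl.2 ≠ "null" then s1 ++ "<" ++ wl.2 ++ "> " else s1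
        (s2 ++ wl.1 ++ " ", wl.2))
      ("", "null")).1) " . " ++ "."

-- ===== PORT B =====
-- itertools.groupby(zip(sentence, labels), key = label): maximal runs of equal labels,
-- each run as (label, words of the run).
def bGroups : List (String × String) → List (String × List String)
  | [] => []
  | (w, l) :: rest =>
      (l, w :: (rest.takeWhile (fun p => p.2 == l)).map Prod.fst) ::
        bGroups (rest.dropWhile (fun p => p.2 == l))
  termination_by l => l.length
  decreasing_by
    have := List.length_dropWhile_le (fun p : String × String => p.2 == l) rest
    simp; omega

-- B's loop over the groups, carrying the previous group's label (None before the first group).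
def bEmit (prev : Option String) : List (String × List String) → String
  | [] => ""
  | (lab, ws) :: gs =>
      (match prev with
       | some p => if p ≠ "null" then "</" ++ p ++ "> " else ""
       | none => "")
      ++ (if lab ≠ "null" then "<" ++ lab ++ "> " else "")
      ++ String.join (ws.map (· ++ " "))
      ++ bEmit (some lab) gs

def tag_exemplar_alt (sentence : List String) (labels : List String) : String :=
  PySem.Str.stripChars (bEmit none (bGroups (List.zip sentence labels))) " . " ++ "."

-- ===== PRECONDITION & SPEC =====
def Spec_tag_exemplar (sentence : List String) (labels : List String) (out : String) : Prop := out = tag_exemplar_alt sentence labels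
instance (sentence : List String) (labels : List String) (out : String) : Decidable (Spec_tag_exemplar sentence labels out) := by unfold Spec_tag_exemplar; infer_instance

-- ===== CLAIM (what is proved, stated in full; the proofs are below) =====
def Claim_equal_tag_exemplar : Prop := ∀ (sentence : List String) (labels : List String), Dom_tag_exemplar sentence labels → Spec_tag_exemplar sentence labels (tag_exemplar sentence labels)

-- ===== LEMMAS AND PROOFS =====

theorem foldl_append_init (l : List String) : ∀ (a : String), l.foldl (· ++ ·) a = a ++ l.foldl (· ++ ·) "" := by
  induction l with
  | nil => simp
  | cons x xs ih =>
    intro a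
    simp only [List.foldl_cons]
    rw [ih (a ++ x), ih ("" ++ x)]
    simp [String.append_assoc]

theorem join_cons (s : String) (l : List String) : String.join (s :: l) = s ++ String.join l := by
  simp only [String.join, List.foldl_cons]
  rw [foldl_append_init]
  simp

-- A's per-pair emission, the suffix produced by A's loop from a given last_label.
def emitA (last : String) : List (String × String) → String
  | [] => ""
  | (w, l) :: rest =>
      (if l ≠ last ∧ last ≠ "null" then "</" ++ last ++ "> " else "")
      ++ (if l ≠ last ∧ l ≠ "null" then "<" ++ l ++ "> " else "")
      ++ w ++ " " ++ emitA l rest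

theorem loopA (ps : List (String × String)) : ∀ (s last : String),
    ((ps.foldl
      (fun (st : String × String) wl =>
        let s1 := if wl.2 ≠ st.2 ∧ st.2 ≠ "null" then st.1 ++ "</" ++ st.2 ++ "> " else st.1
        let s2 := if wl.2 ≠ st.2 ∧ wl.2 ≠ "null" then s1 ++ "<" ++ wl.2 ++ "> " else s1
        (s2 ++ wl.1 ++ " ", wl.2))
      (s, last)).1) = s ++ emitA last ps := by
  induction ps with
  | nil => simp [emitA]
  | cons p rest ih =>
    intro s last
    obtain ⟨w, l⟩ := p
    simp only [List.foldl_cons, emitA, ih]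
    split_ifs <;> simp only [String.append_assoc, String.empty_append]

-- pairs whose label equals `last` contribute only their words
theorem emitA_run (xs : List (String × String)) : ∀ (ys : List (String × String)) (last : String),
    (∀ p ∈ xs, p.2 = last) →
    emitA last (xs ++ ys) = String.join (xs.map (fun p => p.1 ++ " ")) ++ emitA last ys := by
  induction xs with
  | nil => intro ys last _; simp [String.join]
  | cons p rest ih =>
    intro ys last h
    obtain ⟨w, l⟩ := p
    have hl : l = last := h (w, l) (by simp)
    subst hl
    simp only [List.cons_append, emitA, List.map_cons]
    rw [join_cons, ih ys l (fun q hq => h q (by simp [hq]))]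
    simp [String.append_assoc]

theorem head_dropWhile_false {α : Type} (p : α → Bool) (l : List α) (a : α) (as : List α) :
    l.dropWhile p = a :: as → p a = false := by
  induction l with
  | nil => simp
  | cons x xs ih =>
    intro h
    rw [List.dropWhile_cons] at h
    split at h
    · exact ih h
    · cases h; simp_all

-- core: A's per-pair emission equals B's per-run emission, provided the head pair's label
-- differs from `last` or `last` is "null" (both hold at every point B calls it).
theorem emitA_eq_bEmit (n : Nat) : ∀ (ps : List (String × String)) (last : String),
    ps.length ≤ n →
    (∀ w l rest, ps = (w, l) :: rest → l ≠ last ∨ last = "null") →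
    emitA last ps = bEmit (some last) (bGroups ps) := by
  induction n with
  | zero =>
    intro ps last hlen _
    have : ps = [] := by cases ps <;> simp_all
    subst this; rw [bGroups]; rfl
  | succ n ih =>
    intro ps last hlen hhead
    cases ps with
    | nil => rw [bGroups]; rfl
    | cons p rest =>
      obtain ⟨w, l⟩ := p
      have hcase := hhead w l rest rfl
      have hsplit := List.takeWhile_append_dropWhile (p := fun q : String × String => q.2 == l) (l := rest)
      have hrun : emitA l rest
          = String.join ((rest.takeWhile (fun q => q.2 == l)).map (fun q => q.1 ++ " "))
            ++ emitA l (rest.dropWhile (fun q => q.2 == l)) := by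
        conv_lhs => rw [← hsplit]
        exact emitA_run _ _ _ (fun q hq => by
          have := List.mem_takeWhile_imp hq; simpa using this)
      have hdroplen : (rest.dropWhile (fun q : String × String => q.2 == l)).length ≤ n := by
        have := List.length_dropWhile_le (fun q : String × String => q.2 == l) rest
        simp at hlen; omega
      have hrec : emitA l (rest.dropWhile (fun q : String × String => q.2 == l))
          = bEmit (some l) (bGroups (rest.dropWhile (fun q : String × String => q.2 == l))) := by
        apply ih _ _ hdroplen
        intro w' l' rest' heq
        left
        have := head_dropWhile_false _ _ _ _ heq
        simpa using this
      rw [bGroups]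
      simp only [bEmit, emitA]
      rw [hrun, hrec]
      have hclose : (if l ≠ last ∧ last ≠ "null" then "</" ++ last ++ "> " else "")
          = (if last ≠ "null" then "</" ++ last ++ "> " else "") := by
        rcases hcase with h | h
        · simp [h]
        · simp [h]
      have hopen : (if l ≠ last ∧ l ≠ "null" then "<" ++ l ++ "> " else "")
          = (if l ≠ "null" then "<" ++ l ++ "> " else "") := by
        rcases hcase with h | h
        · simp [h]
        · subst h
          by_cases hl : l = "null" <;> simp [hl]
      rw [hclose, hopen]
      simp only [List.map_cons, List.map_map]
      rw [join_cons]
      simp [String.append_assoc]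
      congr 1

theorem bEmit_none_eq_null (gs : List (String × List String)) :
    bEmit none gs = bEmit (some "null") gs := by
  cases gs with
  | nil => rfl
  | cons g gs => obtain ⟨lab, ws⟩ := g; simp [bEmit]

-- ===== VERDICT (by name: the statement is the Claim_ definition above) =====
theorem tag_exemplar_spec : Claim_equal_tag_exemplar := by
  intro sentence labels _
  unfold Spec_tag_exemplar tag_exemplar tag_exemplar_alt
  rw [loopA, bEmit_none_eq_null,
    ← emitA_eq_bEmit (List.zip sentence labels).length _ _ le_rfl
      (by intro w l rest h; right; rfl)]
  simp
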